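-- pv_equiv track=rewrite | github.com/xpan4869/data_processing_projects | record_linkage/record_linkage.py | check_unlabeled
-- ===== SOURCE A (Python) =====
-- def construct_similarity_tuple_dictionary():
--     '''
--     This function initializes a dictionary to store the frequency of each similarity tuple.
--     The similarity tuple is a combination of three categories: 'low', 'medium', and 'high'.
--     The dictionary keys are all possible combinations of these categories, and the values are initialized to 0.
--     '''
--     result = {}
--     for a in ['low', 'medium', 'high']:
--         for b in ['low', 'medium', 'high']:
--             for c in ['low', 'medium', 'high']:
--                 result[(a, b, c)] = 0
--     return result
--
-- def check_unlabeled(possible, match, unmatch):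
--     '''
--     This function checks for unlabeled similarity tuples and updates the classification of each tuple.
--     It handles crossover cases where a tuple is classified as both a match and a non-match, biasing towards matches.
--     It also identifies tuples that were not labeled and adds them to the possible matches.
--     Finally, it returns a mapping of each tuple to its classification.
--     '''
--     mapping = {}
--     partition_dict = construct_similarity_tuple_dictionary()
--     all = partition_dict.keys()
--     new_possible = possible.copy()  # Start with initial possible matches
--
--     # Handle crossover - bias towards matches
--     duplicates = set(match) & set(unmatch)
--     if duplicates:
--         for dup in duplicates:
--                 unmatch.remove(dup)
--
--     # Find missing/unlabeled tuples and add them to possible matches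
--     labeled = set(match + unmatch + new_possible)
--     for tpl in all:
--         if tpl not in labeled:
--             new_possible.append(tpl)
--
--     # Then apply classifications in priority order
--     for pos in new_possible:
--         mapping[pos] = 'possible match'
--     for unm in unmatch:
--         mapping[unm] = 'unmatch'
--     for mat in match:
--         mapping[mat] = 'match'
--
--     return mapping
-- ===== SOURCE B (Python) =====
-- def check_unlabeled(possible, match, unmatch):
--     """Classify every similarity tuple, with priority match > unmatch > possible.
--
--     A tuple voted both match and unmatch loses one unmatch vote (bias toward
--     matches); grid tuples nobody labeled become possible matches.
--     The input lists are left unchanged.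
--     """
--     match_keys = set(match)
--     # crossover bias: drop the first unmatch occurrence of each contested tuple
--     contested = set(unmatch) & match_keys
--     survivors = []
--     for t in unmatch:
--         if t in contested:
--             contested.discard(t)
--         else:
--             survivors.append(t)
--     unmatch_keys = set(survivors)
--     known = match_keys | unmatch_keys | set(possible)
--
--     mapping = {}
--     for t in possible:
--         if t not in mapping:
--             mapping[t] = ('match' if t in match_keys
--                           else 'unmatch' if t in unmatch_keys
--                           else 'possible match')
--     levels = ('low', 'medium', 'high')
--     for a in levels:
--         for b in levels:
--             for c in levels:
--                 if (a, b, c) not in known: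
--                     mapping[(a, b, c)] = 'possible match'
--     for t in survivors:
--         if t not in mapping:
--             mapping[t] = 'match' if t in match_keys else 'unmatch'
--     for t in match:
--         if t not in mapping:
--             mapping[t] = 'match'
--     return mapping
-- ===== Notes on version B (the rewrite author's own statement) =====
-- stated objective: alternative
-- what changed: A builds a 27-entry partition dictionary for the grid keys, copies and extends possible, removes crossover duplicates with one list.remove call per duplicate, and classifies by three overwriting dict passes; B filters unmatch in a single pass with a shrinking drop-set, checks grid tuples inline against a known-set, and builds the mapping write-once, deciding each tuple's final label (match > unmatch > possible) at first sight; B also leaves unmatch unmutated (return values agree).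
import Mathlib
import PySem

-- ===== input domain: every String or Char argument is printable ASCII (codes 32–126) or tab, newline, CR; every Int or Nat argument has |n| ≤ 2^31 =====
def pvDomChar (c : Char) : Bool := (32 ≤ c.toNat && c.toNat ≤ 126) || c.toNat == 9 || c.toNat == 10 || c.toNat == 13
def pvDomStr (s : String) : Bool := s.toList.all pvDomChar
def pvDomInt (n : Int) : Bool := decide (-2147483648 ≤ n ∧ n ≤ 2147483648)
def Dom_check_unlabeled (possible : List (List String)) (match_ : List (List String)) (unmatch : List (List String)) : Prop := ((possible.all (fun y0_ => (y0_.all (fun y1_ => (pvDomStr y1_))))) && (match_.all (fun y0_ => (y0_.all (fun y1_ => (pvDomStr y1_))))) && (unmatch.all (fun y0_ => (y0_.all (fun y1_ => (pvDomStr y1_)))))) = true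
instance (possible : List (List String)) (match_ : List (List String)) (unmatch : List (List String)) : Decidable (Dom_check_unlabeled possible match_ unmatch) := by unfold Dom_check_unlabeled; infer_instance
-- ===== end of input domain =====

-- B replaces A's remove-per-duplicate crossover loop by a one-pass drop-set filter and A's
-- three overwriting dict passes by write-once insertion of each key's final label; equivalence
-- is about the RETURN value only (A mutates `unmatch` in place, B leaves its arguments unchanged).

-- ===== PORT A =====
def construct_similarity_tuple_dictionary : PySem.Dict (List String) Int :=
  ["low", "medium", "high"].foldl (fun d a =>
    ["low", "medium", "high"].foldl (fun d b =>
      ["low", "medium", "high"].foldl (fun d c =>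
        d.insert [a, b, c] 0) d) d) PySem.Dict.empty

def check_unlabeled (possible : List (List String)) (match_ : List (List String)) (unmatch : List (List String)) : List (List String × String) :=
  let partition_dict := construct_similarity_tuple_dictionary
  let all := partition_dict.keys
  let new_possible := possible  -- possible.copy()
  -- duplicates = set(match) & set(unmatch); for dup in duplicates: unmatch.remove(dup)
  -- (removals of distinct values commute, so the set's hash order does not affect the result)
  let duplicates := PySem.Set.inter (PySem.Set.ofList match_) (PySem.Set.ofList unmatch)
  let unmatch := duplicates.foldl (fun u dup => (PySem.List.remove? u dup).getD u) unmatch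
  let labeled := PySem.Set.ofList (match_ ++ unmatch ++ new_possible)
  let new_possible := all.foldl (fun np tpl =>
    if !(PySem.Set.contains labeled tpl) then np ++ [tpl] else np) new_possible
  let mapping := new_possible.foldl (fun m pos => m.insert pos "possible match") PySem.Dict.empty
  let mapping := unmatch.foldl (fun m unm => m.insert unm "unmatch") mapping
  let mapping := match_.foldl (fun m mat => m.insert mat "match") mapping
  mapping.items

-- ===== PORT B =====
def check_unlabeled_alt (possible : List (List String)) (match_ : List (List String)) (unmatch : List (List String)) : List (List String × String) :=
  let match_keys := PySem.Set.ofList match_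
  let contested := PySem.Set.inter (PySem.Set.ofList unmatch) match_keys
  -- one pass: drop the first unmatch occurrence of each contested tuple
  let sp := unmatch.foldl (fun (p : PySem.Set (List String) × List (List String)) t =>
      if t ∈ p.1 then (PySem.Set.discard p.1 t, p.2) else (p.1, p.2 ++ [t])) (contested, [])
  let survivors := sp.2
  let unmatch_keys := PySem.Set.ofList survivors
  let known := PySem.Set.union (PySem.Set.union match_keys unmatch_keys) (PySem.Set.ofList possible)
  let mapping := possible.foldl (fun m t => if m.contains t then m else
      m.insert t (if t ∈ match_keys then "match" else if t ∈ unmatch_keys then "unmatch" else "possible match")) PySem.Dict.empty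
  let levels := ["low", "medium", "high"]
  let mapping := levels.foldl (fun m a => levels.foldl (fun m b => levels.foldl (fun m c =>
      if !(PySem.Set.contains known [a, b, c]) then m.insert [a, b, c] "possible match" else m) m) m) mapping
  let mapping := survivors.foldl (fun m t => if m.contains t then m else
      m.insert t (if t ∈ match_keys then "match" else "unmatch")) mapping
  let mapping := match_.foldl (fun m t => if m.contains t then m else m.insert t "match") mapping
  mapping.items

-- ===== PRECONDITION & SPEC =====
def Spec_check_unlabeled (possible : List (List String)) (match_ : List (List String)) (unmatch : List (List String)) (out : List (List String × String)) : Prop := out = check_unlabeled_alt possible match_ unmatch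
instance (possible : List (List String)) (match_ : List (List String)) (unmatch : List (List String)) (out : List (List String × String)) : Decidable (Spec_check_unlabeled possible match_ unmatch out) := by unfold Spec_check_unlabeled; infer_instance

-- ===== CLAIM =====
def Claim_equal_check_unlabeled : Prop := ∀ (possible : List (List String)) (match_ : List (List String)) (unmatch : List (List String)), Dom_check_unlabeled possible match_ unmatch → Spec_check_unlabeled possible match_ unmatch (check_unlabeled possible match_ unmatch)

-- ===== LEMMAS AND PROOFS =====

-- removing one occurrence, total form
def pvRemoveOne {α : Type} [BEq α] (u : List α) (d : α) : List α := (PySem.List.remove? u d).getD u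

theorem pvRemoveOne_eq {α : Type} [BEq α] [LawfulBEq α] (u : List α) (d : α) :
    pvRemoveOne u d = if d ∈ u then u.erase d else u := by
  unfold pvRemoveOne
  by_cases h : d ∈ u
  · rw [PySem.List.remove?_eq_some_erase u d h]; simp [h]
  · rw [(PySem.List.remove?_eq_none_iff u d).2 h]; simp [h]

theorem pvRemoveOne_comm {α : Type} [BEq α] [LawfulBEq α] (u : List α) {a b : α} (hab : a ≠ b) :
    pvRemoveOne (pvRemoveOne u a) b = pvRemoveOne (pvRemoveOne u b) a := by
  simp only [pvRemoveOne_eq]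
  by_cases ha : a ∈ u <;> by_cases hb : b ∈ u
  · have hba : b ∈ u.erase a := (List.mem_erase_of_ne hab.symm).2 hb
    have hab' : a ∈ u.erase b := (List.mem_erase_of_ne hab).2 ha
    simp [ha, hb, hba, hab', List.erase_comm]
  · have hbe : b ∉ u.erase a := fun h => hb (List.mem_of_mem_erase h)
    simp [ha, hb, hbe]
  · have hae : a ∉ u.erase b := fun h => ha (List.mem_of_mem_erase h)
    simp [ha, hb, hae]
  · simp [ha, hb]

-- scan form of "drop the first occurrence of every element of S"
def pvDropF {α : Type} [BEq α] [LawfulBEq α] : List α → List α → List α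
  | _, [] => []
  | S, t :: u => if t ∈ S then pvDropF (PySem.Set.discard S t) u else t :: pvDropF S u

theorem pvDropF_congr {α : Type} [BEq α] [LawfulBEq α] (u : List α) :
    ∀ S S' : List α, (∀ x, x ∈ S ↔ x ∈ S') → pvDropF S u = pvDropF S' u := by
  induction u with
  | nil => intro S S' _; rfl
  | cons t u ih =>
      intro S S' h
      simp only [pvDropF]
      by_cases ht : t ∈ S
      · rw [if_pos ht, if_pos ((h t).1 ht)]
        exact ih _ _ (fun x => by simp [PySem.Set.mem_discard, h x])
      · rw [if_neg ht, if_neg (fun h' => ht ((h t).2 h'))]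
        exact congrArg _ (ih _ _ h)

-- B's fold is pvDropF
theorem pv_fold_dropF {α : Type} [BEq α] [LawfulBEq α] (u : List α) :
    ∀ (S acc : List α),
      (u.foldl (fun (p : List α × List α) t =>
        if t ∈ p.1 then (PySem.Set.discard p.1 t, p.2) else (p.1, p.2 ++ [t])) (S, acc)).2
      = acc ++ pvDropF S u := by
  induction u with
  | nil => intro S acc; simp [pvDropF]
  | cons t u ih =>
      intro S acc
      simp only [List.foldl_cons, pvDropF]
      by_cases ht : t ∈ S
      · rw [if_pos ht, if_pos ht]; exact ih _ _
      · rw [if_neg ht, if_neg ht]; rw [ih]; simp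

theorem pv_foldl_removeOne_nil {α : Type} [BEq α] [LawfulBEq α] (D : List α) :
    D.foldl pvRemoveOne ([] : List α) = [] := by
  induction D with
  | nil => rfl
  | cons d D ih => simpa [pvRemoveOne_eq] using ih

theorem pv_foldl_removeOne_not_mem {α : Type} [BEq α] [LawfulBEq α] (D : List α) (u : List α) {t : α}
    (ht : t ∉ D) : D.foldl pvRemoveOne (t :: u) = t :: D.foldl pvRemoveOne u := by
  induction D generalizing u with
  | nil => rfl
  | cons d D ih =>
      have hdt : d ≠ t := fun h => ht (h ▸ List.mem_cons_self)
      have hstep : pvRemoveOne (t :: u) d = t :: pvRemoveOne u d := by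
        simp only [pvRemoveOne_eq]
        have hmem : d ∈ t :: u ↔ d ∈ u := by simp [hdt]
        by_cases hd : d ∈ u
        · rw [if_pos (hmem.2 hd), if_pos hd, List.erase_cons_tail (by simp [hdt.symm])]
        · rw [if_neg (fun h => hd (hmem.1 h)), if_neg hd]
      simp only [List.foldl_cons, hstep]
      exact ih _ (fun h => ht (List.mem_cons_of_mem _ h))

theorem pv_foldl_removeOne_pull {α : Type} [BEq α] [LawfulBEq α] (D : List α) (u : List α) {t : α}
    (hd : D.Nodup) (ht : t ∈ D) :
    D.foldl pvRemoveOne u = (D.erase t).foldl pvRemoveOne (pvRemoveOne u t) := by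
  induction D generalizing u with
  | nil => cases ht
  | cons d D ih =>
      by_cases hdt : d = t
      · subst hdt
        rw [List.erase_cons_head]
        rfl
      · have htD : t ∈ D := (List.mem_cons.1 ht).resolve_left (fun h => hdt h.symm)
        have hD : D.Nodup := hd.of_cons
        rw [List.erase_cons_tail (by simp [hdt])]
        simp only [List.foldl_cons]
        rw [ih _ hD htD, pvRemoveOne_comm u hdt]

theorem pv_foldl_removeOne_eq_dropF {α : Type} [BEq α] [LawfulBEq α] (u : List α) :
    ∀ D : List α, D.Nodup → D.foldl pvRemoveOne u = pvDropF D u := by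
  induction u with
  | nil => intro D _; simp [pvDropF, pv_foldl_removeOne_nil]
  | cons t u ih =>
      intro D hD
      simp only [pvDropF]
      by_cases ht : t ∈ D
      · rw [if_pos ht, pv_foldl_removeOne_pull D (t :: u) hD ht]
        have h1 : pvRemoveOne (t :: u) t = u := by
          simp [pvRemoveOne_eq]
        rw [h1, ih _ (hD.erase t)]
        apply pvDropF_congr
        intro x
        rw [PySem.Set.mem_discard, List.Nodup.mem_erase_iff hD]
        exact ⟨fun h => ⟨h.2, h.1⟩, fun h => ⟨h.2, h.1⟩⟩
      · rw [if_neg ht, pv_foldl_removeOne_not_mem D u ht, ih D hD]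

-- Inserting a key appends it iff new: exactly Set.add on the keys.
theorem pv_keys_insert_add {κ ν : Type} [BEq κ] [LawfulBEq κ] (d : PySem.Dict κ ν) (k : κ) (v : ν) :
    (d.insert k v).keys = PySem.Set.add d.keys k := by
  rw [PySem.Set.add_eq_ite]
  by_cases h : k ∈ d.keys
  · rw [PySem.Dict.keys_insert_of_contains d v ((PySem.Dict.contains_iff_mem_keys d k).2 h)]
    simp [h]
  · rw [PySem.Dict.keys_insert_of_not_contains d v]
    · simp [h]
    · exact Bool.not_eq_true _ ▸ (fun hc => h ((PySem.Dict.contains_iff_mem_keys d k).1 hc))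

-- A fold of constant-value inserts: keys become Set.update.
theorem pv_keys_foldl_insert {κ ν : Type} [BEq κ] [LawfulBEq κ] (l : List κ) (v : ν) (d : PySem.Dict κ ν) :
    (l.foldl (fun m k => m.insert k v) d).keys = PySem.Set.update d.keys l := by
  induction l generalizing d with
  | nil => rfl
  | cons x xs ih =>
      simp only [List.foldl_cons, ih, pv_keys_insert_add]
      rfl

theorem pv_nodup_keys_foldl_insert {κ ν : Type} [BEq κ] [LawfulBEq κ] (l : List κ) (v : ν) (d : PySem.Dict κ ν) (h : d.keys.Nodup) :
    (l.foldl (fun m k => m.insert k v) d).keys.Nodup := by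
  induction l generalizing d with
  | nil => exact h
  | cons x xs ih => exact ih _ (PySem.Dict.nodup_keys_insert d x v h)

-- A fold of constant-value inserts: lookup is v on l, unchanged elsewhere.
theorem pv_getD_foldl_insert {κ ν : Type} [BEq κ] [LawfulBEq κ] [DecidableEq κ] (l : List κ) (v d0 : ν) (d : PySem.Dict κ ν) (x : κ) :
    (l.foldl (fun m k => m.insert k v) d).getD x d0 = if x ∈ l then v else d.getD x d0 := by
  induction l generalizing d with
  | nil => simp
  | cons y ys ih =>
      simp only [List.foldl_cons, ih, PySem.Dict.getD_insert, List.mem_cons]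
      by_cases hy : x ∈ ys <;> by_cases hx : x = y <;> simp [hy, hx]

-- write-once (insert-if-absent) fold: keys become Set.update, lookup agrees with f on keys
theorem pv_foldl_insertIfAbsent {κ ν : Type} [BEq κ] [LawfulBEq κ] [DecidableEq κ]
    (l : List κ) (v f : κ → ν) (d0 : ν) (d : PySem.Dict κ ν)
    (hv : ∀ t ∈ l, v t = f t) (hd : ∀ k ∈ d.keys, d.getD k d0 = f k) :
    (l.foldl (fun m t => if m.contains t then m else m.insert t (v t)) d).keys = PySem.Set.update d.keys l ∧
    ∀ k ∈ (l.foldl (fun m t => if m.contains t then m else m.insert t (v t)) d).keys,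
      (l.foldl (fun m t => if m.contains t then m else m.insert t (v t)) d).getD k d0 = f k := by
  induction l generalizing d with
  | nil => exact ⟨rfl, hd⟩
  | cons t xs ih =>
      simp only [List.foldl_cons]
      by_cases hc : d.contains t
      · rw [if_pos hc]
        have hmem : t ∈ d.keys := (PySem.Dict.contains_iff_mem_keys d t).1 hc
        have := ih d (fun x hx => hv x (List.mem_cons_of_mem _ hx)) hd
        refine ⟨?_, this.2⟩
        rw [this.1]
        have : PySem.Set.add d.keys t = d.keys := by
          rw [PySem.Set.add_eq_ite]; simp [hmem]
        show PySem.Set.update d.keys xs = PySem.Set.update (PySem.Set.add d.keys t) xs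
        rw [this]
      · rw [if_neg hc]
        have hd' : ∀ k ∈ (d.insert t (v t)).keys, (d.insert t (v t)).getD k d0 = f k := by
          intro k hk
          rw [PySem.Dict.getD_insert]
          by_cases hkt : k = t
          · rw [if_pos hkt, hkt]; exact hv t List.mem_cons_self
          · rw [if_neg hkt]
            exact hd k (((PySem.Dict.mem_keys_insert d t k (v t)).1 hk).resolve_left hkt)
        have := ih (d.insert t (v t)) (fun x hx => hv x (List.mem_cons_of_mem _ hx)) hd'
        refine ⟨?_, this.2⟩
        rw [this.1, pv_keys_insert_add]
        rfl

-- plain inserts with value function consistent with f: same conclusion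
theorem pv_foldl_insertF {κ ν : Type} [BEq κ] [LawfulBEq κ] [DecidableEq κ]
    (l : List κ) (v f : κ → ν) (d0 : ν) (d : PySem.Dict κ ν)
    (hv : ∀ t ∈ l, v t = f t) (hd : ∀ k ∈ d.keys, d.getD k d0 = f k) :
    (l.foldl (fun m t => m.insert t (v t)) d).keys = PySem.Set.update d.keys l ∧
    ∀ k ∈ (l.foldl (fun m t => m.insert t (v t)) d).keys,
      (l.foldl (fun m t => m.insert t (v t)) d).getD k d0 = f k := by
  induction l generalizing d with
  | nil => exact ⟨rfl, hd⟩
  | cons t xs ih =>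
      simp only [List.foldl_cons]
      have hd' : ∀ k ∈ (d.insert t (v t)).keys, (d.insert t (v t)).getD k d0 = f k := by
        intro k hk
        rw [PySem.Dict.getD_insert]
        by_cases hkt : k = t
        · rw [if_pos hkt, hkt]; exact hv t List.mem_cons_self
        · rw [if_neg hkt]
          exact hd k (((PySem.Dict.mem_keys_insert d t k (v t)).1 hk).resolve_left hkt)
      have := ih (d.insert t (v t)) (fun x hx => hv x (List.mem_cons_of_mem _ hx)) hd'
      refine ⟨?_, this.2⟩
      rw [this.1, pv_keys_insert_add]
      rfl

-- the 27 standard tuples in grid order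
def pvStd : List (List String) :=
  ["low", "medium", "high"].flatMap (fun a =>
    ["low", "medium", "high"].flatMap (fun b =>
      ["low", "medium", "high"].map (fun c => [a, b, c])))

theorem check_unlabeled_eq (possible : List (List String)) (match_ : List (List String)) (unmatch : List (List String)) :
    check_unlabeled possible match_ unmatch = check_unlabeled_alt possible match_ unmatch := by
  unfold check_unlabeled check_unlabeled_alt
  have hkeys : construct_similarity_tuple_dictionary.keys = pvStd := by decide
  simp only [hkeys]
  set dups := PySem.Set.inter (PySem.Set.ofList match_) (PySem.Set.ofList unmatch) with hdups
  set u' := dups.foldl (fun u dup => (PySem.List.remove? u dup).getD u) unmatch with hu'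
  set contested := PySem.Set.inter (PySem.Set.ofList unmatch) (PySem.Set.ofList match_) with hcont
  -- B's one-pass filter produces exactly A's post-removal unmatch list
  have hsurv : (unmatch.foldl (fun (p : PySem.Set (List String) × List (List String)) t =>
      if t ∈ p.1 then (PySem.Set.discard p.1 t, p.2) else (p.1, p.2 ++ [t])) (contested, [])).2 = u' := by
    rw [pv_fold_dropF, List.nil_append]
    rw [pvDropF_congr unmatch contested dups (fun x => by
      rw [hcont, hdups, PySem.Set.mem_inter, PySem.Set.mem_inter]; exact and_comm)]
    rw [hu']
    have : (fun (u : List (List String)) (dup : List String) => (PySem.List.remove? u dup).getD u) = pvRemoveOne := rfl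
    rw [this]
    exact (pv_foldl_removeOne_eq_dropF unmatch dups
      (PySem.Set.nodup_inter _ _ (PySem.Set.nodup_ofList match_))).symm
  rw [hsurv]
  set classify := fun k : List String =>
    if k ∈ match_ then "match" else if k ∈ u' then "unmatch" else "possible match" with hclassify
  -- ===== A side =====
  set labeledA := PySem.Set.ofList (match_ ++ u' ++ possible) with hlabA
  set pA := fun t : List String => !(PySem.Set.contains labeledA t) with hpA
  have hfoldA := PySem.List.foldl_append_if pA id pvStd possible
  simp only [List.map_id, id_eq] at hfoldA
  rw [hfoldA]
  set missing := pvStd.filter pA with hmiss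
  set np := possible ++ missing with hnp
  have hnodA : ((np.foldl (fun m pos => m.insert pos "possible match") PySem.Dict.empty
      |> (u'.foldl (fun m unm => m.insert unm "unmatch") ·)
      |> (match_.foldl (fun m mat => m.insert mat "match") ·))).keys.Nodup :=
    pv_nodup_keys_foldl_insert _ _ _ (pv_nodup_keys_foldl_insert _ _ _
      (pv_nodup_keys_foldl_insert _ _ _ (by simp [PySem.Dict.keys_empty])))
  rw [PySem.Dict.items_eq_map_keys _ hnodA "possible match"]
  have hkA : ((np.foldl (fun m pos => m.insert pos "possible match") PySem.Dict.empty
      |> (u'.foldl (fun m unm => m.insert unm "unmatch") ·)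
      |> (match_.foldl (fun m mat => m.insert mat "match") ·))).keys =
      PySem.Set.update (PySem.Set.update (PySem.Set.update ([] : List (List String)) np) u') match_ := by
    simp only [pv_keys_foldl_insert, PySem.Dict.keys_empty]
  rw [hkA]
  have hgA : ∀ k ∈ PySem.Set.update (PySem.Set.update (PySem.Set.update ([] : List (List String)) np) u') match_,
      ((np.foldl (fun m pos => m.insert pos "possible match") PySem.Dict.empty
      |> (u'.foldl (fun m unm => m.insert unm "unmatch") ·)
      |> (match_.foldl (fun m mat => m.insert mat "match") ·))).getD k "possible match" = classify k := by
    intro k _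
    rw [pv_getD_foldl_insert, pv_getD_foldl_insert, pv_getD_foldl_insert, hclassify]
    by_cases h1 : k ∈ match_
    · simp [h1]
    · by_cases h2 : k ∈ u'
      · simp [h1, h2]
      · by_cases h3 : k ∈ np <;> simp [h1, h2, h3, PySem.Dict.getD_empty]
  rw [List.map_congr_left (fun k hk => by rw [hgA k hk])]
  -- ===== B side =====
  set mkeys := PySem.Set.ofList match_ with hmk
  set ukeys := PySem.Set.ofList u' with huk
  set known := PySem.Set.union (PySem.Set.union mkeys ukeys) (PySem.Set.ofList possible) with hknown
  set pB := fun t : List String => !(PySem.Set.contains known t) with hpB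
  -- grid loop = fold over the 27 standard tuples
  have hgrid : ∀ (m : PySem.Dict (List String) String),
      (["low", "medium", "high"].foldl (fun m a => ["low", "medium", "high"].foldl (fun m b =>
        ["low", "medium", "high"].foldl (fun m c =>
          if !(PySem.Set.contains known [a, b, c]) then m.insert [a, b, c] "possible match" else m) m) m) m)
      = pvStd.foldl (fun m t => if pB t then m.insert t "possible match" else m) m := by
    intro m; rfl
  rw [hgrid]
  have hIF : ∀ (init : PySem.Dict (List String) String),
      List.foldl (fun m t => if pB t = true then m.insert t "possible match" else m) init pvStd
      = List.foldl (fun m t => m.insert t "possible match") init (pvStd.filter pB) :=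
    fun init => PySem.List.foldl_if_eq_foldl_filter pB (fun m t => m.insert t "possible match") pvStd init
  rw [hIF]
  -- the two filters keep the same tuples
  have hfilter : pvStd.filter pB = missing := by
    rw [hmiss]
    apply List.filter_congr
    intro t _
    rw [hpB, hpA]
    show (!PySem.Set.contains known t) = (!PySem.Set.contains labeledA t)
    congr 1
    by_cases h : t ∈ match_ ∨ t ∈ u' ∨ t ∈ possible
    · have hk1 : PySem.Set.contains known t = true := (PySem.Set.contains_iff known t).2 (by
        rw [hknown, PySem.Set.mem_union, PySem.Set.mem_union, hmk, huk,
          PySem.Set.mem_ofList, PySem.Set.mem_ofList, PySem.Set.mem_ofList, or_assoc]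
        exact h)
      have hk2 : PySem.Set.contains labeledA t = true := (PySem.Set.contains_iff labeledA t).2 (by
        rw [hlabA, PySem.Set.mem_ofList]
        simpa using h)
      rw [hk1, hk2]
    · have h1 : PySem.Set.contains known t = false := by
        cases hb : PySem.Set.contains known t with
        | false => rfl
        | true =>
            exfalso
            have hmem := (PySem.Set.contains_iff known t).1 hb
            rw [hknown, PySem.Set.mem_union, PySem.Set.mem_union, hmk, huk,
              PySem.Set.mem_ofList, PySem.Set.mem_ofList, PySem.Set.mem_ofList, or_assoc] at hmem
            exact h hmem
      have h2 : PySem.Set.contains labeledA t = false := by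
        cases hb : PySem.Set.contains labeledA t with
        | false => rfl
        | true =>
            exfalso
            have hmem := (PySem.Set.contains_iff labeledA t).1 hb
            rw [hlabA, PySem.Set.mem_ofList] at hmem
            exact h (by simpa using hmem)
      rw [h1, h2]
  rw [hfilter]
  -- the four write-once folds: keys and lookups
  have hm0 : ∀ k ∈ (PySem.Dict.empty : PySem.Dict (List String) String).keys,
      (PySem.Dict.empty : PySem.Dict (List String) String).getD k "possible match" = classify k := by
    simp [PySem.Dict.keys_empty]
  have hseg1 := pv_foldl_insertIfAbsent possible
    (fun t => if t ∈ mkeys then "match" else if t ∈ ukeys then "unmatch" else "possible match")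
    classify "possible match" PySem.Dict.empty
    (fun t _ => by
      rw [hclassify, hmk, huk]
      simp [PySem.Set.mem_ofList]) hm0
  have hseg2 := pv_foldl_insertF missing (fun _ => "possible match") classify "possible match" _
    (fun t ht => by
      rw [hmiss] at ht
      have hp : pA t = true := List.of_mem_filter ht
      rw [hpA] at hp
      beta_reduce at hp
      have hnot : ¬ t ∈ labeledA := by
        intro hmem
        rw [(PySem.Set.contains_iff labeledA t).2 hmem] at hp
        simp at hp
      rw [hlabA, PySem.Set.mem_ofList] at hnot
      simp only [List.mem_append] at hnot
      simp only [not_or] at hnot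
      rw [hclassify]
      simp [hnot.1.1, hnot.1.2]) hseg1.2
  have hseg3 := pv_foldl_insertIfAbsent u'
    (fun t => if t ∈ mkeys then "match" else "unmatch")
    classify "possible match" _
    (fun t ht => by
      rw [hclassify, hmk]
      by_cases h1 : t ∈ match_ <;> simp [PySem.Set.mem_ofList, h1, ht]) hseg2.2
  have hseg4 := pv_foldl_insertIfAbsent match_
    (fun _ => "match") classify "possible match" _
    (fun t ht => by rw [hclassify]; simp [ht]) hseg3.2
  beta_reduce at hseg1 hseg2 hseg3 hseg4
  have hnodB : (match_.foldl (fun m t => if m.contains t then m else m.insert t "match")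
      (u'.foldl (fun m t => if m.contains t then m else m.insert t (if t ∈ mkeys then "match" else "unmatch"))
      (missing.foldl (fun m t => m.insert t "possible match")
      (possible.foldl (fun m t => if m.contains t then m else
        m.insert t (if t ∈ mkeys then "match" else if t ∈ ukeys then "unmatch" else "possible match"))
        PySem.Dict.empty)))).keys.Nodup := by
    rw [hseg4.1, hseg3.1, hseg2.1, hseg1.1, PySem.Dict.keys_empty]
    exact PySem.Set.nodup_update _ _ (PySem.Set.nodup_update _ _ (PySem.Set.nodup_update _ _
      (PySem.Set.nodup_update _ _ List.nodup_nil)))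
  rw [PySem.Dict.items_eq_map_keys _ hnodB "possible match"]
  rw [hseg4.1, hseg3.1, hseg2.1, hseg1.1, PySem.Dict.keys_empty, hnp]
  have hsplit : PySem.Set.update ([] : List (List String)) (possible ++ missing) =
      PySem.Set.update (PySem.Set.update ([] : List (List String)) possible) missing := by
    show List.foldl PySem.Set.add _ _ = _
    rw [List.foldl_append]
    rfl
  rw [hsplit]
  symm
  apply List.map_congr_left
  intro k hk
  have hk' := hk
  rw [← PySem.Dict.keys_empty (κ := List String) (ν := String)] at hk'
  rw [← hseg1.1, ← hseg2.1, ← hseg3.1, ← hseg4.1] at hk'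
  rw [hseg4.2 k hk']

-- ===== VERDICT =====
theorem check_unlabeled_spec : Claim_equal_check_unlabeled := by
  intro possible match_ unmatch _
  exact check_unlabeled_eq possible match_ unmatch
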